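-- pv_equiv track=rewrite | github.com/owen970517/Programmers_Algo | Level_1/124.py | solution
-- ===== SOURCE A (Python) =====
-- def solution(n):
--     arr=['1','2','4']
--     answer=''
--     while n>0:
--         n-=1
--         answer = arr[n%3]+answer
--         n//=3
--     return answer
-- ===== SOURCE B (Python) =====
-- def solution(n):
--     if n <= 0:
--         return ''
--     return solution((n - 1) // 3) + '124'[(n - 1) % 3]
-- ===== Notes on version B (the rewrite author's own statement) =====
-- stated objective: simpler
-- what changed: Replaces the while-loop with string-prepend accumulator by a direct recursion on the bijective-base-3 quotient that appends the least-significant digit after the recursive call.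
import Mathlib
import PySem

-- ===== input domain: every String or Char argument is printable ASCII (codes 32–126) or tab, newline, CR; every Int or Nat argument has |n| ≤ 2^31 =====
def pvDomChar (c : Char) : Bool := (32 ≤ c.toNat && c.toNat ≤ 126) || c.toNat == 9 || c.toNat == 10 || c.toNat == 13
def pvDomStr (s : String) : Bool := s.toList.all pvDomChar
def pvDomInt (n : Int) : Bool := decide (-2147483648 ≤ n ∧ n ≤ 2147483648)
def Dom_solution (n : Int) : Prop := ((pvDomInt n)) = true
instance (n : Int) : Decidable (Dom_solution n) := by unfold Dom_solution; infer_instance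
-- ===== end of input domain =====

-- Port of A's while-loop vs a direct recursion on the bijective-base-3 quotient (objective: simpler decomposition).


-- ===== PORT A =====
-- the while loop of A: state (n, answer)
def solutionLoop (n : Int) (answer : String) : String :=
  if _h : n > 0 then
    let m := n - 1
    solutionLoop (PySem.Int.floordiv m 3)
      (((PySem.List.pyGetD (["1", "2", "4"] : List String) (PySem.Int.mod m 3) "") ++ answer))
  else answer
termination_by n.toNat
decreasing_by
  have := PySem.Int.floordiv_eq_ediv_of_pos (a := n - 1) (b := 3) (by omega)
  simp only [this]
  omega

def solution (n : Int) : String := solutionLoop n ""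

-- ===== PORT B =====
def solution_alt (n : Int) : String :=
  if _h : n ≤ 0 then ""
  else solution_alt (PySem.Int.floordiv (n - 1) 3)
        ++ String.singleton ((PySem.Str.pyGet? "124" (PySem.Int.mod (n - 1) 3)).getD ' ')
termination_by n.toNat
decreasing_by
  have := PySem.Int.floordiv_eq_ediv_of_pos (a := n - 1) (b := 3) (by omega)
  simp only [this]
  omega

-- ===== PRECONDITION & SPEC =====
def Spec_solution (n : Int) (out : String) : Prop := out = solution_alt n
instance (n : Int) (out : String) : Decidable (Spec_solution n out) := by unfold Spec_solution; infer_instance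

-- ===== CLAIM (what is proved, stated in full; the proofs are below) =====
def Claim_equal_solution : Prop := ∀ (n : Int), Dom_solution n → Spec_solution n (solution n)

-- ===== LEMMAS AND PROOFS =====
lemma digit_eq (m : Int) :
    PySem.List.pyGetD (["1", "2", "4"] : List String) (PySem.Int.mod m 3) ""
      = String.singleton ((PySem.Str.pyGet? "124" (PySem.Int.mod m 3)).getD ' ') := by
  have h3 : (0:Int) < 3 := by norm_num
  have he := PySem.Int.mod_eq_emod_of_pos (a := m) (b := 3) h3
  have h1 : 0 ≤ PySem.Int.mod m 3 := by rw [he]; exact Int.emod_nonneg m (by norm_num)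
  have h2 : PySem.Int.mod m 3 < 3 := by rw [he]; exact Int.emod_lt_of_pos m h3
  set r := PySem.Int.mod m 3 with hr
  interval_cases r <;> decide

lemma loop_eq_alt (n : Int) (answer : String) :
    solutionLoop n answer = solution_alt n ++ answer := by
  by_cases h : n > 0
  · have hlt : (PySem.Int.floordiv (n - 1) 3).toNat < n.toNat := by
      have := PySem.Int.floordiv_eq_ediv_of_pos (a := n - 1) (b := 3) (by omega)
      simp only [this]; omega
    rw [solutionLoop, solution_alt]
    simp only [h, dif_pos, dif_neg (by omega : ¬ n ≤ 0)]
    rw [loop_eq_alt (PySem.Int.floordiv (n - 1) 3)]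
    rw [digit_eq (n - 1)]
    simp only [← String.append_assoc]
  · rw [solutionLoop, solution_alt]
    simp [h, (by omega : n ≤ 0)]
termination_by n.toNat
decreasing_by exact hlt

-- ===== VERDICT (by name: the statement is the Claim_ definition above) =====
theorem solution_spec : Claim_equal_solution := by
  intro n _
  unfold Spec_solution solution
  rw [loop_eq_alt]
  simp
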